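/-
  THE GLUE VOCABULARY OF Vorbis/State.lean, part 1: MEMORIES THAT AGREE ON THE LIVE SET.

  The vocabulary of "the object in two memories" — `Copied`, `ObjEq`, `ObjSame`, `DecodeSame`, `Move`, `Group`, `Group.Moves /
  Carries / Stable`, `OB1` — is in Vorbis/Blocks.lean (every owner file needs it). What is left here is the bridge from the LIVE
  SET of the shadow layer to the block predicate of the decoder layer:

      AgreeOn Live mem mem'      the two memories agree on every byte of the set `Live`            (`h.u32 a hin`, `h.same hB`)
                                 — what a store to a byte outside every live object leaves (a push, a spill into the current
                                 frame below every protected object, a callee whose footprint avoids the live objects).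
      AgreeOn.allKept            … hence every allocated block is kept (`BlkLive Blk Live`, `BlkOK Blk`): the `AllKept Blk mem mem'`
                                 that `Group.Carries`, `VorbisOK.carries`, `FB.carry`, `DeinitOK.agree` take.
      Move.covers'               the cover of the live set after the struct copy (the shadow is untouched).
-/
import Vorbis.Bits
namespace Vorbis
open X86 X86.User Asan

/-! ### `AgreeOn`: two memories agree on a set of bytes -/

/-- **`mem'` agrees with `mem` on every byte of the set `Live`.** The frame hypothesis of a whole layer at the level of the
shadow: what a store outside every live object, or a callee whose footprint avoids the live objects, leaves. -/
def AgreeOn (Live : Nat → Prop) (mem mem' : Mem) : Prop :=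
  ∀ x, Live x → mem'.read (addr x) = mem.read (addr x)

namespace AgreeOn
variable {Live Live' : Nat → Prop} {mem mem' mem'' : Mem}

/-- Nothing changed. -/
theorem refl (Live : Nat → Prop) (mem : Mem) : AgreeOn Live mem mem := fun _ _ => rfl

/-- One step further. -/
theorem trans (h1 : AgreeOn Live mem mem') (h2 : AgreeOn Live mem' mem'') : AgreeOn Live mem mem'' :=
  fun x hx => (h2 x hx).trans (h1 x hx)

/-- The other way round. -/
theorem symm (h : AgreeOn Live mem mem') : AgreeOn Live mem' mem := fun x hx => (h x hx).symm

/-- A smaller set. -/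
theorem mono (h : AgreeOn Live mem mem') (hl : ∀ x, Live' x → Live x) : AgreeOn Live' mem mem' :=
  fun x hx => h x (hl x hx)

/-- **A live block reads the same.** -/
theorem same (h : AgreeOn Live mem mem') {B : Block} (hB : B.live Live) : B.Same mem mem' := by
  intro a h1 h2
  have hl : Live a.toNat := (Block.live_iff Live B).mp hB a.toNat ⟨h1, h2⟩
  have := h a.toNat hl
  rw [addr_toNat] at this
  exact this

/-- **Every allocated block is kept**: the form the decoder layer's coarse frame lemmas take. -/
theorem allKept {Blk : Block → Prop} (h : AgreeOn Live mem mem') (hL : BlkLive Blk Live) (hok : BlkOK Blk) :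
    AllKept Blk mem mem' :=
  fun B hB => ⟨h.same (hL B hB), hok.no_wrap hB⟩

/-- A read of live bytes. -/
theorem readLE (h : AgreeOn Live mem mem') (a k : Nat) (hin : InLive Live a k) :
    mem'.readLE (addr a) k = mem.readLE (addr a) k :=
  readLE_addr_congr mem mem' a a k (fun i hi => h (a + i) (hin i hi))

theorem u8 (h : AgreeOn Live mem mem') (a : Nat) (hin : InLive Live a 1) : mem'.u8 a = mem.u8 a := h.readLE a 1 hin
theorem u16 (h : AgreeOn Live mem mem') (a : Nat) (hin : InLive Live a 2) : mem'.u16 a = mem.u16 a := h.readLE a 2 hin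
theorem u32 (h : AgreeOn Live mem mem') (a : Nat) (hin : InLive Live a 4) : mem'.u32 a = mem.u32 a := h.readLE a 4 hin
theorem u64 (h : AgreeOn Live mem mem') (a : Nat) (hin : InLive Live a 8) : mem'.u64 a = mem.u64 a := h.readLE a 8 hin
theorem i8 (h : AgreeOn Live mem mem') (a : Nat) (hin : InLive Live a 1) : mem'.i8 a = mem.i8 a :=
  congrArg sint8 (h.u8 a hin)
theorem i16 (h : AgreeOn Live mem mem') (a : Nat) (hin : InLive Live a 2) : mem'.i16 a = mem.i16 a :=
  congrArg sint16 (h.u16 a hin)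
theorem i32 (h : AgreeOn Live mem mem') (a : Nat) (hin : InLive Live a 4) : mem'.i32 a = mem.i32 a :=
  congrArg sint32 (h.u32 a hin)
theorem ptr (h : AgreeOn Live mem mem') (a : Nat) (hin : InLive Live a 8) : mem'.ptr a = mem.ptr a := h.u64 a hin
theorem f32bits (h : AgreeOn Live mem mem') (a : Nat) (hin : InLive Live a 4) : mem'.f32bits a = mem.f32bits a :=
  h.u32 a hin

/-- **A callee whose footprint meets no live byte** (`Mem.SameExcept`, the `writes` of a contract). `Live` lies below `2 ^ 64`
(from `Covers.inside`: below `C00000H`). -/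
theorem of_sameExcept {ws : List Span} (hs : Mem.SameExcept ws mem mem') (hlt : ∀ x, Live x → x < 2 ^ 64)
    (hd : ∀ x, Live x → ∀ w, w ∈ ws → x < w.lo ∨ w.hi ≤ x) : AgreeOn Live mem mem' := by
  intro x hx
  apply hs
  intro w hw
  rw [toNat_addr x (hlt x hx)]
  exact hd x hx w hw

/-- The same with the bound taken from the cover of the live set. -/
theorem of_sameExcept_covers {ws : List Span} (hs : Mem.SameExcept ws mem mem') (hc : Covers Live mem)
    (hd : ∀ x, Live x → ∀ w, w ∈ ws → x < w.lo ∨ w.hi ≤ x) : AgreeOn Live mem mem' := by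
  apply of_sameExcept hs _ hd
  intro x hx
  have := hc.inside x hx
  omega

/-- **One store of the walker that hits no live byte** (a push, a spill into the current frame). -/
theorem of_writeLE (mem : Mem) (w : Word) (k v : Nat) (hw : w.toNat + k ≤ 2 ^ 64) (hlt : ∀ x, Live x → x < 2 ^ 64)
    (hd : ∀ x, Live x → x < w.toNat ∨ w.toNat + k ≤ x) : AgreeOn Live mem (mem.writeLE w k v) := by
  intro x hx
  have e := toNat_addr x (hlt x hx)
  have := hd x hx
  exact Mem.read_writeLE_disjoint_noWrap mem w k v (addr x) hw (by omega)

/-- A store INSIDE a live block `C` agrees on the live set without `C`'s bytes. -/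
theorem of_writeLE_in (mem : Mem) (C : Block) (b k v : Nat) (hc : C.contains b k) (hC : C.base + C.size ≤ 2 ^ 64)
    (hlt : ∀ x, Live x → x < 2 ^ 64) :
    AgreeOn (fun x => Live x ∧ ¬ C.mem x) mem (mem.writeLE (addr b) k v) := by
  unfold Block.contains at hc
  by_cases hk : k = 0
  · subst hk
    exact AgreeOn.refl _ _
  · have e : (addr b).toNat = b := toNat_addr b (by omega)
    apply of_writeLE mem (addr b) k v (by omega) (fun x hx => hlt x hx.1)
    intro x hx
    have hn := hx.2
    unfold Block.mem at hn
    omega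

/-- The cover of the live set survives as soon as the shadow is untouched; stated here because `AgreeOn` never mentions the shadow
(`Covers.eqOn` of Asan/Shadow.lean is the lemma; this is its name in the glue vocabulary). -/
theorem covers (hc : Covers Live mem) (hsh : Mem.EqOn 0xC00000 0xE00000 mem mem') : Covers Live mem' := hc.eqOn hsh

end AgreeOn

/-- The cover of the NEW live set after the struct copy, given the cover before it (the shadow is untouched). -/
theorem Move.covers' {Blk Blk' : Block → Prop} {Live' : Nat → Prop} {mem mem' : Mem} {p f : Nat}
    (h : Move Blk Blk' mem mem' p f) (hc : Covers Live' mem) : Covers Live' mem' :=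
  hc.eqOn h.shadow

/-- Two groups that move, move together. -/
theorem Group.Moves.and {P Q : Group} (hP : P.Moves) (hQ : Q.Moves) : Group.Moves (fun B m f => P B m f ∧ Q B m f) :=
  fun Blk Blk' mem mem' p f hm h => ⟨hP Blk Blk' mem mem' p f hm h.1, hQ Blk Blk' mem mem' p f hm h.2⟩

end Vorbis
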